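-- pv_equiv track=rewrite | github.com/Piyush170502/Melosphere-AI | app.py | interleave_words
-- ===== SOURCE A (Python) =====
-- def interleave_words(original, translations_by_lang):
--     tokenized = [t.split() for t in translations_by_lang]
--     max_len = max(len(t) for t in tokenized) if tokenized else 0
--     blended_tokens = []
--     for i in range(max_len):
--         for tok_list in tokenized:
--             if i < len(tok_list):
--                 tok = tok_list[i]
--                 if blended_tokens and tok.lower() == blended_tokens[-1].lower():
--                     continue
--                 blended_tokens.append(tok)
--     return " ".join(blended_tokens)
-- ===== SOURCE B (Python) =====
-- def _merge(buckets, toks):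
--     # extend per-position buckets with one translation's tokens (row-major)
--     k = min(len(buckets), len(toks))
--     return ([b + [t] for b, t in zip(buckets, toks)]
--             + buckets[k:]
--             + [[t] for t in toks[k:]])
--
-- def interleave_words(original, translations_by_lang):
--     buckets = []
--     for t in translations_by_lang:
--         buckets = _merge(buckets, t.split())
--     out = []
--     for bucket in buckets:
--         for tok in bucket:
--             if not out or tok.lower() != out[-1].lower():
--                 out.append(tok)
--     return " ".join(out)
-- ===== Notes on version B (the rewrite author's own statement) =====
-- stated objective: alternative
-- what changed: Instead of A's column-major nested index loop (range over the max length with per-list bounds checks and inline dedup), B makes one row-major pass that merges each translation's tokens into a position-indexed list of buckets, then flattens the buckets and deduplicates in a separate pass.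
import Mathlib
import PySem

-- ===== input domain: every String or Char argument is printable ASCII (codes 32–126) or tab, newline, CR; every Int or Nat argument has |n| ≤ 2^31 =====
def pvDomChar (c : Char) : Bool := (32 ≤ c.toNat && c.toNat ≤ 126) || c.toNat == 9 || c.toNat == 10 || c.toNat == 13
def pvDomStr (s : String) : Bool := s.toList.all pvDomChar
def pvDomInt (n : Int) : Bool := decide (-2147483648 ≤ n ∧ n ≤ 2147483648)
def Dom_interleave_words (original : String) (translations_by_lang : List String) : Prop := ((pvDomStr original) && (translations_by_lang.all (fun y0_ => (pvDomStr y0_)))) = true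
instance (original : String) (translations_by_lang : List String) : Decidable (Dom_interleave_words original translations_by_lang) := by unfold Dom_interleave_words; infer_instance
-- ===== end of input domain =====

-- B replaces A's column-major nested index loop by one row-major pass that merges each
-- translation's tokens into position-indexed buckets, then flattens and dedups separately.
-- Same return value; objective: alternative decomposition.

-- ===== PORT A =====
def interleave_words (original : String) (translations_by_lang : List String) : String :=
  let tokenized := translations_by_lang.map PySem.Str.split₀
  let max_len := if tokenized.isEmpty then 0 else (tokenized.map List.length).foldl Nat.max 0
  let blended := (List.range max_len).foldl (fun acc i =>
      tokenized.foldl (fun acc tok_list =>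
        if i < tok_list.length then
          -- tok = tok_list[i]; 'blended_tokens and …' short-circuits, so the
          -- getLastD default is never consulted on an empty accumulator
          let tok := tok_list.getD i ""
          if acc ≠ [] ∧ PySem.Str.lower tok = PySem.Str.lower (acc.getLastD "") then acc
          else acc ++ [tok]
        else acc) acc) []
  PySem.Str.join " " blended

-- ===== PORT B =====
-- _merge: zip truncates to the shorter list; buckets[k:]/toks[k:] with 0 ≤ k are List.drop
def pvMergeRow (buckets : List (List String)) (toks : List String) : List (List String) :=
  let k := min buckets.length toks.length
  ((buckets.zip toks).map (fun p => p.1 ++ [p.2]))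
    ++ buckets.drop k ++ ((toks.drop k).map (fun t => [t]))

def interleave_words_alt (original : String) (translations_by_lang : List String) : String :=
  let buckets := translations_by_lang.foldl
      (fun bs t => pvMergeRow bs (PySem.Str.split₀ t)) []
  let out := buckets.foldl (fun out bucket =>
      bucket.foldl (fun out tok =>
        if out = [] ∨ PySem.Str.lower tok ≠ PySem.Str.lower (out.getLastD "") then out ++ [tok]
        else out) out) []
  PySem.Str.join " " out

-- ===== PRECONDITION & SPEC =====
def Spec_interleave_words (original : String) (translations_by_lang : List String) (out : String) : Prop := out = interleave_words_alt original translations_by_lang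
instance (original : String) (translations_by_lang : List String) (out : String) : Decidable (Spec_interleave_words original translations_by_lang out) := by unfold Spec_interleave_words; infer_instance

-- ===== CLAIM (what is proved, stated in full; the proofs are below) =====
def Claim_equal_interleave_words : Prop := ∀ (original : String) (translations_by_lang : List String), Dom_interleave_words original translations_by_lang → Spec_interleave_words original translations_by_lang (interleave_words original translations_by_lang)

-- ===== LEMMAS AND PROOFS =====

-- B's dedup-append step equals A's (A short-circuits via the last element's presence)
theorem pvStep_eq (acc : List String) (tok : String) :
    (if acc = [] ∨ PySem.Str.lower tok ≠ PySem.Str.lower (acc.getLastD "") then acc ++ [tok]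
     else acc)
      = (if acc ≠ [] ∧ PySem.Str.lower tok = PySem.Str.lower (acc.getLastD "") then acc
         else acc ++ [tok]) := by
  by_cases h1 : acc = [] <;> by_cases h2 : PySem.Str.lower tok = PySem.Str.lower (acc.getLastD "") <;>
    simp [h1, h2]

-- fold of a bounds-guarded indexed body = fold over the filterMap of the lookups
theorem pvFoldlFilterMap (g : List String → String → List String) (i : Nat)
    (l : List (List String)) (b : List String) :
    l.foldl (fun b tl => if i < tl.length then g b (tl.getD i "") else b) b
      = (l.filterMap (fun tl => tl[i]?)).foldl g b := by
  induction l generalizing b with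
  | nil => rfl
  | cons t l ih =>
    simp only [List.foldl_cons, List.filterMap_cons]
    by_cases h : i < t.length
    · rw [if_pos h, List.getElem?_eq_getElem h, List.getD_eq_getElem t "" h]
      simp only [List.foldl_cons]
      exact ih _
    · rw [if_neg h, List.getElem?_eq_none (by omega)]
      exact ih _

-- nested fold = fold over the flatMap
theorem pvFoldlFlatMap {α β γ : Type} (g : β → α → β) (f : γ → List α) (l : List γ) (b : β) :
    l.foldl (fun b c => (f c).foldl g b) b = (l.flatMap f).foldl g b := by
  induction l generalizing b with
  | nil => rfl
  | cons c l ih => simp [List.foldl_append, ih]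

theorem pvLeFoldlMax (l : List Nat) (a x : Nat) (h : x ∈ l) : x ≤ l.foldl Nat.max a := by
  have seed : ∀ (l : List Nat) (a : Nat), a ≤ l.foldl Nat.max a := by
    intro l
    induction l with
    | nil => intro a; exact le_refl a
    | cons y l ih => intro a; exact le_trans (Nat.le_max_left a y) (ih _)
  induction l generalizing a with
  | nil => simp at h
  | cons y l ih =>
    rcases List.mem_cons.mp h with rfl | hm
    · exact le_trans (Nat.le_max_right a x) (seed l _)
    · exact ih _ hm

-- pvMergeRow in closed form: pointwise append of the optional lookups
theorem pvMergeRow_eq (bs : List (List String)) (t : List String) :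
    pvMergeRow bs t
      = (List.range (max bs.length t.length)).map
          (fun i => (bs[i]?).getD [] ++ (t[i]?).toList) := by
  induction bs generalizing t with
  | nil =>
    apply List.ext_getElem
    · simp [pvMergeRow]
    · intro i h1 h2
      simp only [pvMergeRow, List.length_nil, List.zip_nil_left, List.map_nil,
        Nat.min_def, Nat.zero_le, if_pos, List.drop_nil, List.nil_append, List.drop_zero,
        List.length_map] at h1 ⊢
      simp only [List.getElem_map, List.getElem_range, List.getElem?_nil, Option.getD_none,
        List.nil_append]
      rw [List.getElem?_eq_getElem (by omega)]
      rfl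
  | cons b bs ih =>
    cases t with
    | nil =>
      apply List.ext_getElem
      · simp [pvMergeRow]
      · intro i h1 h2
        simp only [pvMergeRow, List.zip_nil_right, List.map_nil, List.nil_append,
          List.length_nil, Nat.min_zero, List.drop_zero, List.drop_nil, List.append_nil] at h1 ⊢
        simp only [List.getElem_map, List.getElem_range]
        rw [List.getElem?_eq_getElem (by simpa using h2), List.getElem?_nil]
        simp
    | cons x t =>
      have hstep : pvMergeRow (b :: bs) (x :: t) = (b ++ [x]) :: pvMergeRow bs t := by
        simp [pvMergeRow, Nat.succ_min_succ]
      rw [hstep, ih]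
      have hmax : max (b :: bs).length (x :: t).length = max bs.length t.length + 1 := by
        simp only [List.length_cons]
        omega
      rw [hmax, List.range_succ_eq_map, List.map_cons, List.map_map]
      congr 1

-- the bucket table after the whole row-major pass, in closed form
theorem pvBuckets (ts : List (List String)) :
    ts.foldl pvMergeRow []
      = (List.range ((ts.map List.length).foldl Nat.max 0)).map
          (fun i => ts.filterMap (fun tl => tl[i]?)) := by
  induction ts using List.reverseRecOn with
  | nil => rfl
  | append_singleton ts t ih =>
    rw [List.foldl_append, List.foldl_cons, List.foldl_nil, ih, pvMergeRow_eq]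
    have hmax : ((ts ++ [t]).map List.length).foldl Nat.max 0
        = max ((ts.map List.length).foldl Nat.max 0) t.length := by
      rw [List.map_append, List.foldl_append]
      rfl
    have hlen : ((List.range ((ts.map List.length).foldl Nat.max 0)).map
        (fun i => ts.filterMap (fun tl => tl[i]?))).length
        = (ts.map List.length).foldl Nat.max 0 := by simp
    rw [hlen, hmax]
    apply List.map_congr_left
    intro i hi
    rw [List.filterMap_append]
    have ht : [t].filterMap (fun tl => tl[i]?) = (t[i]?).toList := by
      cases h : t[i]? <;> simp [h]
    rw [ht]
    congr 1
    by_cases him : i < (ts.map List.length).foldl Nat.max 0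
    · rw [List.getElem?_map, List.getElem?_range him]
      rfl
    · rw [List.getElem?_eq_none (by simpa using him)]
      have : ts.filterMap (fun tl => tl[i]?) = [] := by
        rw [List.filterMap_eq_nil_iff]
        intro tl htl
        have : tl.length ≤ i :=
          le_trans (pvLeFoldlMax (ts.map List.length) 0 tl.length (List.mem_map_of_mem htl))
            (by omega)
        exact List.getElem?_eq_none this
      simp [this]

-- ===== VERDICT (by name: the statement is the Claim_ definition above) =====
theorem interleave_words_spec : Claim_equal_interleave_words := by
  intro original tls _
  unfold Spec_interleave_words
  simp only [interleave_words, interleave_words_alt]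
  congr 1
  have hlen : (if (tls.map PySem.Str.split₀).isEmpty then 0
      else ((tls.map PySem.Str.split₀).map List.length).foldl Nat.max 0)
      = ((tls.map PySem.Str.split₀).map List.length).foldl Nat.max 0 := by
    cases tls <;> rfl
  rw [hlen]
  -- A's nested loop = dedup fold over the column-major token stream
  rw [show ∀ (ts : List (List String)) (n : Nat),
      (List.range n).foldl (fun acc i =>
        ts.foldl (fun acc tok_list =>
          if i < tok_list.length then
            let tok := tok_list.getD i ""
            if acc ≠ [] ∧ PySem.Str.lower tok = PySem.Str.lower (acc.getLastD "") then acc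
            else acc ++ [tok]
          else acc) acc) ([] : List String)
      = ((List.range n).flatMap (fun i => ts.filterMap (fun tl => tl[i]?))).foldl
          (fun acc tok =>
            if acc ≠ [] ∧ PySem.Str.lower tok = PySem.Str.lower (acc.getLastD "") then acc
            else acc ++ [tok]) []
    from fun ts n => by
      rw [← pvFoldlFlatMap]
      refine List.foldl_ext _ _ _ ?_
      intro acc i _
      exact pvFoldlFilterMap
        (fun acc tok =>
          if acc ≠ [] ∧ PySem.Str.lower tok = PySem.Str.lower (acc.getLastD "") then acc
          else acc ++ [tok]) i ts acc]
  -- B's nested loop = dedup fold over the flattened bucket table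
  rw [← List.foldl_map (f := PySem.Str.split₀) (g := pvMergeRow) (l := tls) (init := ([] : List (List String)))]
  rw [pvFoldlFlatMap
      (fun out tok =>
        if out = [] ∨ PySem.Str.lower tok ≠ PySem.Str.lower (out.getLastD "") then out ++ [tok]
        else out)
      (fun bucket => bucket)
      ((tls.map PySem.Str.split₀).foldl pvMergeRow [])]
  rw [pvBuckets, List.flatMap_map]
  refine (List.foldl_ext _ _ _ ?_).symm
  intro acc tok _
  exact pvStep_eq acc tok
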